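-- pv_equiv track=rewrite | github.com/litvinovserge/WebAcademy | HomeWork_6/AssertTests/assert_Task_04.py | list_converter
-- ===== SOURCE A (Python) =====
-- def list_converter(some_list):
--     temp_max = some_list[0]
--     temp_min = some_list[0]
--     index_max = 0
--     index_min = 0
--     for i in range(len(some_list)):
--         if some_list[i] > temp_max:
--             temp_max = some_list[i]
--             index_max = i
--         if some_list[i] < temp_min:
--             temp_min = some_list[i]
--             index_min = i
--
--     some_list[index_max] = temp_min
--     some_list[index_min] = temp_max
--     return some_list
-- ===== SOURCE B (Python) =====
-- def list_converter(some_list):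
--     s = sorted(some_list)
--     mn = s[0]
--     mx = s[-1]
--     out = []
--     need_max = True
--     need_min = True
--     for x in some_list:
--         if need_max and x == mx:
--             out.append(mn)
--             need_max = False
--         elif need_min and x == mn:
--             out.append(mx)
--             need_min = False
--         else:
--             out.append(x)
--     some_list[:] = out
--     return some_list
-- ===== Notes on version B (the rewrite author's own statement) =====
-- stated objective: alternative
-- what changed: Instead of tracking running max/min with indices and doing two in-place point assignments, B finds the extremes by sorting a copy and rebuilds the whole list in one pass with need_max/need_min flags that swap the first occurrence of each extreme.
import Mathlib
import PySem

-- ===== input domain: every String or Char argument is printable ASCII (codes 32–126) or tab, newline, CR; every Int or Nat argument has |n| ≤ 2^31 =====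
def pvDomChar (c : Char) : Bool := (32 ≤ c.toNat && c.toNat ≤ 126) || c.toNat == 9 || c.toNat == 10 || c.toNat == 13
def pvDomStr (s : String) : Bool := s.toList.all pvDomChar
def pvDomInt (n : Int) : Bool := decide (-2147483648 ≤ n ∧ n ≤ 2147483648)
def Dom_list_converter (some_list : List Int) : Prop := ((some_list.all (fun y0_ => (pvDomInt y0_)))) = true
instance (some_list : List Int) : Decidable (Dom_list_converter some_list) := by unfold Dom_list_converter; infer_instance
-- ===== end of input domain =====

-- B swaps the max and min by sorting a copy to obtain the two extremes and then REBUILDING the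
-- list in one pass with need_max/need_min flags, instead of A's running max/min/index tracking
-- followed by two in-place point assignments (alternative decomposition; same result).
-- Both A and B mutate the argument list in place in Python (A assigns two cells, B assigns the
-- whole list via some_list[:] = out); the equivalence proved here is about the return value.

-- ===== PORT A =====
def list_converter (some_list : List Int) : List Int :=
  match some_list with
  | [] => []  -- 'some_list[0]' raises IndexError on []; excluded by Pre_
  | h :: _ =>
    -- state ((temp_max, index_max), (temp_min, index_min)); 'for i in range(len(some_list))'
    -- visits exactly the in-range indices, so List.range / getD is exact here
    let st := (List.range some_list.length).foldl
      (fun st i =>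
        (if some_list.getD i 0 > st.1.1 then (some_list.getD i 0, i) else st.1,
         if some_list.getD i 0 < st.2.1 then (some_list.getD i 0, i) else st.2))
      ((h, 0), (h, 0))
    (some_list.set st.1.2 st.2.1).set st.2.2 st.1.1

-- ===== PORT B =====
def list_converter_alt (some_list : List Int) : List Int :=
  let s := PySem.List.sorted some_list (fun x => x) false
  match PySem.List.pyGet? s 0, PySem.List.pyGet? s (-1) with
  | some mn, some mx =>
    -- for x in some_list: append mn / mx / x according to the need_max / need_min flags
    let st := some_list.foldl
      (fun (st : List Int × Bool × Bool) x =>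
        if st.2.1 && (x == mx) then (st.1 ++ [mn], false, st.2.2)
        else if st.2.2 && (x == mn) then (st.1 ++ [mx], st.2.1, false)
        else (st.1 ++ [x], st.2.1, st.2.2))
      ([], true, true)
    st.1
  | _, _ => []  -- 's[0]' raises IndexError on []; excluded by Pre_

-- ===== PRECONDITION & SPEC =====
-- Both A and B raise IndexError on the empty list; it is excluded.
def Pre_list_converter (some_list : List Int) : Prop := some_list ≠ []
instance (some_list : List Int) : Decidable (Pre_list_converter some_list) := by unfold Pre_list_converter; infer_instance
def pvWitness_list_converter : List Int := [3, -1, 2]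

def Spec_list_converter (some_list : List Int) (out : List Int) : Prop := out = list_converter_alt some_list
instance (some_list : List Int) (out : List Int) : Decidable (Spec_list_converter some_list out) := by unfold Spec_list_converter; infer_instance

-- ===== CLAIM (what is proved, stated in full; the proofs are below) =====
def Claim_equal_list_converter : Prop := ∀ (some_list : List Int), Dom_list_converter some_list → Pre_list_converter some_list → Spec_list_converter some_list (list_converter some_list)

-- ===== LEMMAS AND PROOFS =====

-- ---- A side: the index loop is the zipIdx loop, and each accumulator is (extreme, first index) ----

-- the index-driven loop over range(len(l)) is the loop over the (value, index) pairs of l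
lemma bridgeA (l : List Int) :
    ∀ (init : (Int × Nat) × (Int × Nat)),
      (List.range l.length).foldl
        (fun st i =>
          (if l.getD i 0 > st.1.1 then (l.getD i 0, i) else st.1,
           if l.getD i 0 < st.2.1 then (l.getD i 0, i) else st.2)) init
      = l.zipIdx.foldl
        (fun st x =>
          (if x.1 > st.1.1 then (x.1, x.2) else st.1,
           if x.1 < st.2.1 then (x.1, x.2) else st.2)) init := by
  induction l using List.reverseRecOn with
  | nil => intro init; simp
  | append_singleton l a ih =>
    intro init
    have hlen : (l ++ [a]).length = l.length + 1 := by simp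
    rw [hlen, List.range_succ, List.foldl_append, List.zipIdx_append, List.foldl_append]
    have hpref :
        (List.range l.length).foldl
          (fun st i =>
            (if (l ++ [a]).getD i 0 > st.1.1 then ((l ++ [a]).getD i 0, i) else st.1,
             if (l ++ [a]).getD i 0 < st.2.1 then ((l ++ [a]).getD i 0, i) else st.2)) init
        = l.zipIdx.foldl
          (fun st x =>
            (if x.1 > st.1.1 then (x.1, x.2) else st.1,
             if x.1 < st.2.1 then (x.1, x.2) else st.2)) init := by
      rw [PySem.List.foldl_congr_mem (g := fun st i =>
            (if l.getD i 0 > st.1.1 then (l.getD i 0, i) else st.1,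
             if l.getD i 0 < st.2.1 then (l.getD i 0, i) else st.2))]
      · exact ih init
      · intro acc i hi
        have hi' : i < l.length := List.mem_range.mp hi
        have : (l ++ [a]).getD i 0 = l.getD i 0 := by
          simp [List.getD, List.getElem?_append_left hi']
        rw [this]
    rw [hpref]
    simp [List.zipIdx, List.getD]

lemma max_fold_char (t : List Int) :
    ∀ (k j : Nat) (c : Int),
      (t.zipIdx k).foldl (fun p x => if x.1 > p.1 then (x.1, x.2) else p) (c, j)
      = (t.foldl max c,
         if t.foldl max c = c then j
         else k + (PySem.List.index? t (t.foldl max c)).getD 0) := by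
  induction t with
  | nil => intro k j c; simp
  | cons a t ih =>
    intro k j c
    rw [List.zipIdx_cons, List.foldl_cons, List.foldl_cons]
    dsimp only
    by_cases hac : a > c
    · rw [if_pos hac]
      rw [ih (k + 1) k a]
      have haM : a ≤ t.foldl max a := (PySem.List.le_foldl_max t a).1
      rw [max_eq_right (le_of_lt hac)]
      have hMc : t.foldl max a ≠ c := by omega
      rw [if_neg hMc]
      by_cases hMa : t.foldl max a = a
      · rw [if_pos hMa, hMa, PySem.List.index?_cons_self]
        simp
      · rw [if_neg hMa]
        have hMem : t.foldl max a ∈ t := by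
          rcases PySem.List.foldl_max_mem t a with h | h
          · exact absurd h hMa
          · exact h
        obtain ⟨i, hi⟩ := Option.isSome_iff_exists.mp
          ((PySem.List.index?_isSome_iff t (t.foldl max a)).mpr hMem)
        have hne : a ≠ t.foldl max a := fun h => hMa h.symm
        rw [PySem.List.index?_cons_of_ne t hne, hi]
        simp; omega
    · rw [if_neg hac]
      rw [ih (k + 1) j c]
      rw [max_eq_left (show a ≤ c by omega)]
      by_cases hMc : t.foldl max c = c
      · rw [if_pos hMc, if_pos hMc]
      · rw [if_neg hMc, if_neg hMc]
        have hcM : c ≤ t.foldl max c := (PySem.List.le_foldl_max t c).1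
        have hMem : t.foldl max c ∈ t := by
          rcases PySem.List.foldl_max_mem t c with h | h
          · exact absurd h hMc
          · exact h
        obtain ⟨i, hi⟩ := Option.isSome_iff_exists.mp
          ((PySem.List.index?_isSome_iff t (t.foldl max c)).mpr hMem)
        have hne : a ≠ t.foldl max c := by omega
        rw [PySem.List.index?_cons_of_ne t hne, hi]
        simp; omega

lemma min_fold_char (t : List Int) :
    ∀ (k j : Nat) (c : Int),
      (t.zipIdx k).foldl (fun p x => if x.1 < p.1 then (x.1, x.2) else p) (c, j)
      = (t.foldl min c,
         if t.foldl min c = c then j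
         else k + (PySem.List.index? t (t.foldl min c)).getD 0) := by
  induction t with
  | nil => intro k j c; simp
  | cons a t ih =>
    intro k j c
    rw [List.zipIdx_cons, List.foldl_cons, List.foldl_cons]
    dsimp only
    by_cases hac : a < c
    · rw [if_pos hac]
      rw [ih (k + 1) k a]
      have haM : t.foldl min a ≤ a := (PySem.List.foldl_min_le t a).1
      rw [min_eq_right (le_of_lt hac)]
      have hMc : t.foldl min a ≠ c := by omega
      rw [if_neg hMc]
      by_cases hMa : t.foldl min a = a
      · rw [if_pos hMa, hMa, PySem.List.index?_cons_self]
        simp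
      · rw [if_neg hMa]
        have hMem : t.foldl min a ∈ t := by
          rcases PySem.List.foldl_min_mem t a with h | h
          · exact absurd h hMa
          · exact h
        obtain ⟨i, hi⟩ := Option.isSome_iff_exists.mp
          ((PySem.List.index?_isSome_iff t (t.foldl min a)).mpr hMem)
        have hne : a ≠ t.foldl min a := fun h => hMa h.symm
        rw [PySem.List.index?_cons_of_ne t hne, hi]
        simp; omega
    · rw [if_neg hac]
      rw [ih (k + 1) j c]
      rw [min_eq_left (show c ≤ a by omega)]
      by_cases hMc : t.foldl min c = c
      · rw [if_pos hMc, if_pos hMc]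
      · rw [if_neg hMc, if_neg hMc]
        have hcM : t.foldl min c ≤ c := (PySem.List.foldl_min_le t c).1
        have hMem : t.foldl min c ∈ t := by
          rcases PySem.List.foldl_min_mem t c with h | h
          · exact absurd h hMc
          · exact h
        obtain ⟨i, hi⟩ := Option.isSome_iff_exists.mp
          ((PySem.List.index?_isSome_iff t (t.foldl min c)).mpr hMem)
        have hne : a ≠ t.foldl min c := by omega
        rw [PySem.List.index?_cons_of_ne t hne, hi]
        simp; omega

-- A in canonical form: set the first max position to the min value, then the first min position to the max value
lemma A_canonical (h : Int) (t : List Int) :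
    list_converter (h :: t)
      = ((h :: t).set ((PySem.List.index? (h :: t) (t.foldl max h)).getD 0) (t.foldl min h)).set
          ((PySem.List.index? (h :: t) (t.foldl min h)).getD 0) (t.foldl max h) := by
  simp only [list_converter]
  rw [bridgeA (h :: t)]
  rw [PySem.List.foldl_prod_mk
      (f := fun p (x : Int × Nat) => if x.1 > p.1 then (x.1, x.2) else p)
      (g := fun p (x : Int × Nat) => if x.1 < p.1 then (x.1, x.2) else p)]
  rw [max_fold_char (h :: t) 0 0 h, min_fold_char (h :: t) 0 0 h]
  rw [List.foldl_cons, List.foldl_cons, max_self, min_self]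
  by_cases hM : t.foldl max h = h
  · by_cases hm : t.foldl min h = h
    · simp [hM, hm, List.idxOf?_cons]
    · simp [hM, hm, List.idxOf?_cons]
  · by_cases hm : t.foldl min h = h
    · simp [hM, hm, List.idxOf?_cons]
    · simp [hM, hm]

-- ---- B side: the flag loop as a recursion, and its characterisation ----

-- the flag-driven rebuilding pass of B, as a structural recursion (bM = need_max, bm = need_min)
def goB (mx mn : Int) : List Int → Bool → Bool → List Int
  | [], _, _ => []
  | x :: t, bM, bm =>
    if bM && (x == mx) then mn :: goB mx mn t false bm
    else if bm && (x == mn) then mx :: goB mx mn t bM false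
    else x :: goB mx mn t bM bm

lemma foldl_goB (mx mn : Int) :
    ∀ (l : List Int) (acc : List Int) (bM bm : Bool),
      (l.foldl
        (fun (st : List Int × Bool × Bool) x =>
          if st.2.1 && (x == mx) then (st.1 ++ [mn], false, st.2.2)
          else if st.2.2 && (x == mn) then (st.1 ++ [mx], st.2.1, false)
          else (st.1 ++ [x], st.2.1, st.2.2))
        (acc, bM, bm)).1
      = acc ++ goB mx mn l bM bm := by
  intro l
  induction l with
  | nil => intro acc bM bm; simp [goB]
  | cons x t ih =>
    intro acc bM bm
    rw [List.foldl_cons]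
    dsimp only
    by_cases h1 : bM && (x == mx)
    · rw [if_pos h1]
      rw [ih (acc ++ [mn]) false bm]
      simp [goB, h1]
    · rw [if_neg h1]
      by_cases h2 : bm && (x == mn)
      · rw [if_pos h2]
        rw [ih (acc ++ [mx]) bM false]
        simp [goB, h1, h2]
      · rw [if_neg h2]
        rw [ih (acc ++ [x]) bM bm]
        simp [goB, h1, h2]

lemma goB_ff (mx mn : Int) : ∀ (l : List Int), goB mx mn l false false = l := by
  intro l; induction l with
  | nil => rfl
  | cons x t ih => simp [goB, ih]

-- with only the min flag on, the pass replaces the first occurrence of mn by mx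
lemma goB_min (mx mn : Int) :
    ∀ (pre suf : List Int), mn ∉ pre →
      goB mx mn (pre ++ mn :: suf) false true = pre ++ mx :: suf := by
  intro pre
  induction pre with
  | nil => intro suf _; simp [goB, goB_ff]
  | cons p pre ih =>
    intro suf hnp
    have hp : p ≠ mn := by intro h; exact hnp (h ▸ List.mem_cons_self)
    simp only [List.cons_append, goB, Bool.false_and, Bool.true_and]
    rw [if_neg (by simp), if_neg (by simp [hp])]
    rw [ih suf (fun h => hnp (List.mem_cons_of_mem _ h))]

-- with only the max flag on, the pass replaces the first occurrence of mx by mn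
lemma goB_max (mx mn : Int) :
    ∀ (pre suf : List Int), mx ∉ pre →
      goB mx mn (pre ++ mx :: suf) true false = pre ++ mn :: suf := by
  intro pre
  induction pre with
  | nil => intro suf _; simp [goB, goB_ff]
  | cons p pre ih =>
    intro suf hnp
    have hp : p ≠ mx := by intro h; exact hnp (h ▸ List.mem_cons_self)
    simp only [List.cons_append, goB, Bool.false_and, Bool.true_and]
    rw [if_neg (by simp [hp]), if_neg (by simp)]
    rw [ih suf (fun h => hnp (List.mem_cons_of_mem _ h))]

-- if every element equals the (coinciding) extreme, the pass returns the list unchanged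
lemma goB_const (mx mn : Int) (hmm : mn = mx) :
    ∀ (l : List Int) (bM bm : Bool), (∀ y ∈ l, y = mx) → goB mx mn l bM bm = l := by
  intro l
  induction l with
  | nil => intro bM bm _; rfl
  | cons x t ih =>
    intro bM bm hall
    have hx : x = mx := hall x List.mem_cons_self
    have ht : ∀ y ∈ t, y = mx := fun y hy => hall y (List.mem_cons_of_mem _ hy)
    simp only [goB]
    split_ifs with h1 h2
    · rw [ih false bm ht]; rw [hx, hmm]
    · rw [ih bM false ht]; rw [hx, ← hmm]
    · rw [ih bM bm ht]

lemma set_len_append {α : Type} (pre : List α) (a b : α) (suf : List α) :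
    (pre ++ a :: suf).set pre.length b = pre ++ b :: suf := by
  induction pre with
  | nil => rfl
  | cons p pre ih => simp [ih]

-- with both flags on, and two distinct extremes present, the pass is the canonical two-set form
lemma goB_tt (mx mn : Int) (hne : mn ≠ mx) :
    ∀ (l : List Int), mx ∈ l → mn ∈ l →
      goB mx mn l true true
        = (l.set ((PySem.List.index? l mx).getD 0) mn).set
            ((PySem.List.index? l mn).getD 0) mx := by
  intro l
  induction l with
  | nil => intro h; exact absurd h (List.not_mem_nil)
  | cons x t ih =>
    intro hmx hmn
    by_cases hxM : x = mx
    · have hxm : x ≠ mn := by rw [hxM]; exact fun h => hne h.symm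
      have hmnt : mn ∈ t := by
        rcases List.mem_cons.mp hmn with h | h
        · exact absurd h.symm hxm
        · exact h
      obtain ⟨i, hi⟩ := Option.isSome_iff_exists.mp
        ((PySem.List.index?_isSome_iff t mn).mpr hmnt)
      obtain ⟨pre, suf, hdecomp, hlen, hpre⟩ :=
        (PySem.List.index?_eq_some_iff t mn i).mp hi
      simp only [goB, Bool.true_and]
      rw [if_pos (by simp [hxM])]
      rw [hxM, PySem.List.index?_cons_self,
          PySem.List.index?_cons_of_ne t hne.symm, hi]
      simp only [Option.getD_some, Option.map_some]
      rw [List.set_cons_zero, List.set_cons_succ]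
      rw [hdecomp, goB_min mx mn pre suf hpre, ← hlen, set_len_append]
    · by_cases hxm : x = mn
      · have hmxt : mx ∈ t := by
          rcases List.mem_cons.mp hmx with h | h
          · exact absurd h.symm hxM
          · exact h
        obtain ⟨i, hi⟩ := Option.isSome_iff_exists.mp
          ((PySem.List.index?_isSome_iff t mx).mpr hmxt)
        obtain ⟨pre, suf, hdecomp, hlen, hpre⟩ :=
          (PySem.List.index?_eq_some_iff t mx i).mp hi
        simp only [goB, Bool.true_and]
        rw [if_neg (by simp [hxM]), if_pos (by simp [hxm])]
        rw [hxm, PySem.List.index?_cons_self,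
            PySem.List.index?_cons_of_ne t hne, hi]
        simp only [Option.getD_some, Option.map_some]
        rw [List.set_cons_succ, List.set_cons_zero]
        rw [hdecomp, goB_max mx mn pre suf hpre, ← hlen, set_len_append]
      · have hmxt : mx ∈ t := by
          rcases List.mem_cons.mp hmx with h | h
          · exact absurd h.symm hxM
          · exact h
        have hmnt : mn ∈ t := by
          rcases List.mem_cons.mp hmn with h | h
          · exact absurd h.symm hxm
          · exact h
        obtain ⟨iM, hiM⟩ := Option.isSome_iff_exists.mp
          ((PySem.List.index?_isSome_iff t mx).mpr hmxt)
        obtain ⟨im, him⟩ := Option.isSome_iff_exists.mp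
          ((PySem.List.index?_isSome_iff t mn).mpr hmnt)
        simp only [goB, Bool.true_and]
        rw [if_neg (by simp [hxM]), if_neg (by simp [hxm])]
        rw [ih hmxt hmnt]
        rw [PySem.List.index?_cons_of_ne t (fun h => hxM h),
            PySem.List.index?_cons_of_ne t (fun h => hxm h), hiM, him]
        simp only [Option.map_some, Option.getD_some]
        rw [List.set_cons_succ, List.set_cons_succ]

-- in a ≤-sorted list every element is at most the last one
lemma mem_le_getLast : ∀ (l : List Int) (hl : l ≠ []),
    l.Pairwise (· ≤ ·) → ∀ y ∈ l, y ≤ l.getLast hl := by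
  intro l
  induction l with
  | nil => intro hl; exact absurd rfl hl
  | cons a l ih =>
    intro _ hp y hy
    rcases List.pairwise_cons.mp hp with ⟨ha, hpl⟩
    rcases List.mem_cons.mp hy with rfl | hy'
    · cases l with
      | nil => simp
      | cons b l' =>
        rw [List.getLast_cons (l := b :: l') (by simp)]
        exact ha _ (List.getLast_mem _)
    · cases l with
      | nil => exact absurd hy' List.not_mem_nil
      | cons b l' =>
        rw [List.getLast_cons (l := b :: l') (by simp)]
        exact ih (by simp) hpl y hy'

-- the head of sorted(l) is the running-min value, its last element the running-max value
lemma sorted_head_last (h : Int) (t : List Int) :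
    ∃ s₀ srest, PySem.List.sorted (h :: t) (fun x => x) false = s₀ :: srest ∧
      s₀ = t.foldl min h ∧ (s₀ :: srest).getLast (by simp) = t.foldl max h := by
  have hsne : PySem.List.sorted (h :: t) (fun x => x) false ≠ [] := by
    rw [Ne, PySem.List.sorted_eq_nil_iff]; simp
  obtain ⟨s₀, srest, hsc⟩ := List.exists_cons_of_ne_nil hsne
  have hperm : ∀ y : Int, y ∈ (s₀ :: srest) ↔ y ∈ (h :: t) := by
    intro y
    rw [← hsc]
    exact PySem.List.mem_sorted (h :: t) (fun x : Int => x) false y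
  refine ⟨s₀, srest, hsc, ?_, ?_⟩
  · -- head = min
    have hmem : s₀ ∈ (h :: t) := (hperm s₀).mp List.mem_cons_self
    have hle : ∀ y ∈ (h :: t), s₀ ≤ y := by
      have := PySem.List.key_head_sorted_le (h :: t) (fun x => x) hsc
      simpa using this
    have h1 : t.foldl min h ≤ s₀ := by
      rcases List.mem_cons.mp hmem with hh | hh
      · rw [hh]; exact (PySem.List.foldl_min_le t h).1
      · exact (PySem.List.foldl_min_le t h).2 s₀ hh
    have h2 : s₀ ≤ t.foldl min h := by
      rcases PySem.List.foldl_min_mem t h with hh | hh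
      · rw [hh]; exact hle h List.mem_cons_self
      · exact hle _ (List.mem_cons_of_mem _ hh)
    omega
  · -- last = max
    have hpw : (s₀ :: srest).Pairwise (· ≤ ·) := by
      have := PySem.List.sorted_pairwise (h :: t) (fun x : Int => x)
      rw [hsc] at this
      simpa using this
    have hlast_mem : (s₀ :: srest).getLast (by simp) ∈ (h :: t) :=
      (hperm _).mp (List.getLast_mem _)
    have hge : ∀ y ∈ (h :: t), y ≤ (s₀ :: srest).getLast (by simp) := by
      intro y hy
      exact mem_le_getLast _ (by simp) hpw y ((hperm y).mpr hy)
    have h1 : (s₀ :: srest).getLast (by simp) ≤ t.foldl max h := by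
      rcases List.mem_cons.mp hlast_mem with hh | hh
      · rw [hh]; exact (PySem.List.le_foldl_max t h).1
      · exact (PySem.List.le_foldl_max t h).2 _ hh
    have h2 : t.foldl max h ≤ (s₀ :: srest).getLast (by simp) := by
      rcases PySem.List.foldl_max_mem t h with hh | hh
      · rw [hh]; exact hge h List.mem_cons_self
      · exact hge _ (List.mem_cons_of_mem _ hh)
    omega

-- ===== VERDICT (by name: the statement is the Claim_ definition above) =====
theorem list_converter_spec : Claim_equal_list_converter := by
  intro some_list _hdom hpre
  unfold Spec_list_converter
  cases some_list with
  | nil => exact absurd rfl hpre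
  | cons h t =>
    obtain ⟨s₀, srest, hcons, hhead, hlast⟩ := sorted_head_last h t
    have hget0 : PySem.List.pyGet? (PySem.List.sorted (h :: t) (fun x => x) false) 0
        = some (t.foldl min h) := by
      rw [hcons, ← hhead]
      simp [PySem.List.pyGet?, PySem.List.pyIdx?]
    have hgetm1 : PySem.List.pyGet? (PySem.List.sorted (h :: t) (fun x => x) false) (-1)
        = some (t.foldl max h) := by
      rw [hcons, ← hlast]
      simp [PySem.List.pyGet?, PySem.List.pyIdx?, List.getLast_eq_getElem]
      rfl
    simp only [list_converter_alt, hget0, hgetm1]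
    rw [foldl_goB (t.foldl max h) (t.foldl min h) (h :: t) [] true true, List.nil_append]
    rw [A_canonical h t]
    have hmxmem : t.foldl max h ∈ (h :: t) := by
      rcases PySem.List.foldl_max_mem t h with hh | hh
      · rw [hh]; exact List.mem_cons_self
      · exact List.mem_cons_of_mem _ hh
    have hmnmem : t.foldl min h ∈ (h :: t) := by
      rcases PySem.List.foldl_min_mem t h with hh | hh
      · rw [hh]; exact List.mem_cons_self
      · exact List.mem_cons_of_mem _ hh
    have hmax_ub : ∀ y ∈ (h :: t), y ≤ t.foldl max h := by
      intro y hy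
      rcases List.mem_cons.mp hy with hh | hh
      · rw [hh]; exact (PySem.List.le_foldl_max t h).1
      · exact (PySem.List.le_foldl_max t h).2 y hh
    have hmin_lb : ∀ y ∈ (h :: t), t.foldl min h ≤ y := by
      intro y hy
      rcases List.mem_cons.mp hy with hh | hh
      · rw [hh]; exact (PySem.List.foldl_min_le t h).1
      · exact (PySem.List.foldl_min_le t h).2 y hh
    set mx := t.foldl max h with hmx
    set mn := t.foldl min h with hmn
    by_cases hmm : mn = mx
    · -- all elements coincide: the pass and the two sets both leave the list unchanged
      have hall : ∀ y ∈ (h :: t), y = mx := fun y hy =>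
        le_antisymm (hmax_ub y hy) (hmm ▸ hmin_lb y hy)
      rw [goB_const mx mn hmm (h :: t) true true hall]
      have hh : h = mx := hall h List.mem_cons_self
      rw [hmm, ← hh, PySem.List.index?_cons_self]
      simp
    · rw [goB_tt mx mn hmm (h :: t) hmxmem hmnmem]
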